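-- pv_equiv track=rewrite | github.com/SwapnilDoijad/nanoCutter | scripts/Collapser.py | _segments_from_bin
-- ===== SOURCE A (Python) =====
-- from typing import Dict, List, Tuple, Optional
--
-- def _segments_from_bin(points: List[Tuple[int,int]], k: int, max_gap: int) -> List[Tuple[int,int,int,int]]:
--     """Chain sorted (i,j) into segments allowing gaps; return half-open coords."""
--     if not points: return []
--     points.sort(key=lambda x: x[0])
--     segs: List[Tuple[int,int,int,int]] = []
--     imin = imax = points[0][0]; jmin = jmax = points[0][1]
--     prev_i, prev_j = points[0]
--     for i, j in points[1:]:
--         if (i - prev_i) <= max_gap and abs(j - prev_j) <= max_gap: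
--             imax = max(imax, i); jmin = min(jmin, j); jmax = max(jmax, j)
--         else:
--             segs.append((imin, imax + k, jmin, jmax + k))
--             imin = imax = i; jmin = jmax = j
--         prev_i, prev_j = i, j
--     segs.append((imin, imax + k, jmin, jmax + k))
--     return segs
-- ===== SOURCE B (Python) =====
-- def _segments_from_bin(points, k, max_gap):
--     """Group-then-reduce: split the sorted points into gap-separated groups,
--     then map each group to its bounding segment. Sorts `points` in place like A."""
--     if not points:
--         return []
--     points.sort(key=lambda x: x[0])
--     groups = []
--     cur = [points[0]]
--     prev_i, prev_j = points[0]
--     for i, j in points[1:]: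
--         if (i - prev_i) <= max_gap and abs(j - prev_j) <= max_gap:
--             cur.append((i, j))
--         else:
--             groups.append(cur)
--             cur = [(i, j)]
--         prev_i, prev_j = i, j
--     groups.append(cur)
--     return [(min(p[0] for p in g), max(p[0] for p in g) + k,
--              min(p[1] for p in g), max(p[1] for p in g) + k) for g in groups]
-- ===== Notes on version B (the rewrite author's own statement) =====
-- stated objective: alternative
-- what changed: A chains points in one pass with a running (imin,imax,jmin,jmax) accumulator; B first splits the sorted list into gap-separated groups and then maps each group to (min i, max i + k, min j, max j + k) in a separate reduction pass.
import Mathlib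
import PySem

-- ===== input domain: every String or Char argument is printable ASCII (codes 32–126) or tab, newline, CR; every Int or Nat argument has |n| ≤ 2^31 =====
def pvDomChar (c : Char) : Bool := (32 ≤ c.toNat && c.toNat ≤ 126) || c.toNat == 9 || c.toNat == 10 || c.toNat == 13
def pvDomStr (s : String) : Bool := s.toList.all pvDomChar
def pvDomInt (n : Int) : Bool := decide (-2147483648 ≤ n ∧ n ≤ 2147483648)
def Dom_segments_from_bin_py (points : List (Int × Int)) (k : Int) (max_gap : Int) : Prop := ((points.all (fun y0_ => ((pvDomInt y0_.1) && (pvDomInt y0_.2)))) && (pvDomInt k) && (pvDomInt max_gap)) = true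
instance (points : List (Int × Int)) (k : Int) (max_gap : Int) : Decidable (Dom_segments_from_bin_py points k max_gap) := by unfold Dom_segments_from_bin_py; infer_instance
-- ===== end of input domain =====

-- B replaces A's single-pass min/max accumulator by a split-into-groups pass followed by a
-- per-group min/max reduction (objective: alternative decomposition, same cost).
-- Both Pythons sort `points` in place; the equivalence proved here is about the return value.

-- ===== PORT A =====
-- A's for-loop over points[1:] with state (segs, imin, imax, jmin, jmax, prev_i, prev_j)
def segA_go (k g : Int) (segs : List (Int × Int × Int × Int))
    (imin imax jmin jmax prev_i prev_j : Int) :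
    List (Int × Int) → List (Int × Int × Int × Int)
  | [] => segs ++ [(imin, imax + k, jmin, jmax + k)]
  | (i, j) :: rest =>
    if i - prev_i ≤ g ∧ |j - prev_j| ≤ g then
      segA_go k g segs imin (max imax i) (min jmin j) (max jmax j) i j rest
    else
      segA_go k g (segs ++ [(imin, imax + k, jmin, jmax + k)]) i i j j i j rest

def segments_from_bin_py (points : List (Int × Int)) (k : Int) (max_gap : Int) :
    List (Int × Int × Int × Int) :=
  if points.isEmpty then []
  else
    match PySem.List.sorted points (fun x => x.1) false with
    | [] => []
    | (i0, j0) :: rest => segA_go k max_gap [] i0 i0 j0 j0 i0 j0 rest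

-- ===== PORT B =====
-- B's grouping pass: split the sorted tail into gap-separated consecutive groups
def segB_group (g : Int) (cur : List (Int × Int)) (prev_i prev_j : Int) :
    List (Int × Int) → List (List (Int × Int))
  | [] => [cur]
  | (i, j) :: rest =>
    if i - prev_i ≤ g ∧ |j - prev_j| ≤ g then segB_group g (cur ++ [(i, j)]) i j rest
    else cur :: segB_group g [(i, j)] i j rest

-- B's per-group reduction: (min i, max i + k, min j, max j + k); groups are never empty
def segB_red (k : Int) (grp : List (Int × Int)) : Int × Int × Int × Int :=
  match grp with
  | [] => (0, k, 0, k)  -- unreachable: segB_group only produces nonempty groups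
  | (a0, b0) :: t =>
      (t.foldl (fun a p => min a p.1) a0,
       t.foldl (fun a p => max a p.1) a0 + k,
       t.foldl (fun a p => min a p.2) b0,
       t.foldl (fun a p => max a p.2) b0 + k)

def segments_from_bin_py_alt (points : List (Int × Int)) (k : Int) (max_gap : Int) :
    List (Int × Int × Int × Int) :=
  if points.isEmpty then []
  else
    match PySem.List.sorted points (fun x => x.1) false with
    | [] => []
    | (i0, j0) :: rest => (segB_group max_gap [(i0, j0)] i0 j0 rest).map (segB_red k)

-- ===== PRECONDITION & SPEC =====
def Spec_segments_from_bin_py (points : List (Int × Int)) (k : Int) (max_gap : Int) (out : List (Int × Int × Int × Int)) : Prop := out = segments_from_bin_py_alt points k max_gap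
instance (points : List (Int × Int)) (k : Int) (max_gap : Int) (out : List (Int × Int × Int × Int)) : Decidable (Spec_segments_from_bin_py points k max_gap out) := by unfold Spec_segments_from_bin_py; infer_instance

-- ===== CLAIM (what is proved, stated in full; the proofs are below) =====
def Claim_equal_segments_from_bin_py : Prop := ∀ (points : List (Int × Int)) (k : Int) (max_gap : Int), Dom_segments_from_bin_py points k max_gap → Spec_segments_from_bin_py points k max_gap (segments_from_bin_py points k max_gap)

-- ===== LEMMAS AND PROOFS =====

-- core invariant: A's running (imin, imax, jmin, jmax) is B's reduction of the current group;
-- needs that every upcoming first coordinate is ≥ imin (the list was sorted by fst).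
theorem segA_go_eq (k g : Int) :
    ∀ (rest : List (Int × Int)) (t : List (Int × Int)) (a0 b0 : Int)
      (segs : List (Int × Int × Int × Int)) (prev_i prev_j : Int),
      (∀ x ∈ rest, t.foldl (fun a p => min a p.1) a0 ≤ x.1) →
      rest.Pairwise (fun a b => a.1 ≤ b.1) →
      segA_go k g segs (t.foldl (fun a p => min a p.1) a0)
          (t.foldl (fun a p => max a p.1) a0)
          (t.foldl (fun a p => min a p.2) b0)
          (t.foldl (fun a p => max a p.2) b0) prev_i prev_j rest
        = segs ++ (segB_group g ((a0, b0) :: t) prev_i prev_j rest).map (segB_red k) := by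
  intro rest
  induction rest with
  | nil =>
    intro t a0 b0 segs prev_i prev_j _ _
    simp [segA_go, segB_group, segB_red]
  | cons p rest ih =>
    intro t a0 b0 segs prev_i prev_j hmin hpw
    obtain ⟨i, j⟩ := p
    rw [List.pairwise_cons] at hpw
    by_cases hc : i - prev_i ≤ g ∧ |j - prev_j| ≤ g
    · have hle : t.foldl (fun a p => min a p.1) a0 ≤ i := hmin (i, j) (by simp)
      have h1 : (t ++ [(i, j)]).foldl (fun a p => min a p.1) a0
          = t.foldl (fun a p => min a p.1) a0 := by
        simp [List.foldl_append, min_eq_left hle]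
      have h2 : (t ++ [(i, j)]).foldl (fun a p => max a p.1) a0
          = max (t.foldl (fun a p => max a p.1) a0) i := by
        simp [List.foldl_append]
      have h3 : (t ++ [(i, j)]).foldl (fun a p => min a p.2) b0
          = min (t.foldl (fun a p => min a p.2) b0) j := by
        simp [List.foldl_append]
      have h4 : (t ++ [(i, j)]).foldl (fun a p => max a p.2) b0
          = max (t.foldl (fun a p => max a p.2) b0) j := by
        simp [List.foldl_append]
      have hIH := ih (t ++ [(i, j)]) a0 b0 segs i j
        (by intro x hx; rw [h1]; exact hmin x (by simp [hx]))
        hpw.2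
      rw [h1, h2, h3, h4] at hIH
      simp only [segA_go, segB_group]
      rw [if_pos hc, if_pos hc, List.cons_append]
      exact hIH
    · have hIH := ih [] i j (segs ++ [(t.foldl (fun a p => min a p.1) a0,
          t.foldl (fun a p => max a p.1) a0 + k,
          t.foldl (fun a p => min a p.2) b0,
          t.foldl (fun a p => max a p.2) b0 + k)]) i j
        (by intro x hx; simp only [List.foldl_nil]; exact (hpw.1 x hx))
        hpw.2
      simp only [List.foldl_nil] at hIH
      simp only [segA_go, segB_group]
      rw [if_neg hc, if_neg hc, hIH]
      simp [segB_red, List.append_assoc]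

-- ===== VERDICT (by name: the statement is the Claim_ definition above) =====
theorem segments_from_bin_py_spec : Claim_equal_segments_from_bin_py := by
  intro points k max_gap _
  unfold Spec_segments_from_bin_py segments_from_bin_py segments_from_bin_py_alt
  by_cases hp : points.isEmpty
  · simp [hp]
  · simp only [hp]
    have hpw := PySem.List.sorted_pairwise points (fun x => x.1) (κ := Int)
    cases hs : PySem.List.sorted points (fun x => x.1) false with
    | nil => rfl
    | cons p rest =>
      obtain ⟨i0, j0⟩ := p
      rw [hs, List.pairwise_cons] at hpw
      have := segA_go_eq k max_gap rest [] i0 j0 [] i0 j0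
        (by intro x hx; simpa using hpw.1 x hx) hpw.2
      simpa using this
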